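-- pv_equiv track=rewrite | github.com/tamaraviv/TrendSpotter | backend/src/processors/utils.py | count_names_in_sentence
-- ===== SOURCE A (Python) =====
-- def count_names_in_sentence(sentence_list: list[list[str]], name_list: list[str]) -> dict[str, int]:
--     """
--     this func counts how many times each word occurs in the sentence and returns a dict of main name as
--     key and the number of times it occurs in the sentence as value
--     :param sentence_list:
--     :param name_list:
--     :return:
--     """
--     return_dict = {}
--     for full_name in name_list:
--         if not full_name or not full_name[0]:
--             continue
--         main_name = " ".join(full_name[0])
--         return_dict[main_name] = 0
--
--     for sublist in sentence_list:
--         for full_name in name_list: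
--             main_name = " ".join(full_name[0])
--             for name in full_name[0]:
--                 return_dict[main_name] += sublist.count(name)
--
--             if full_name[1]:
--                 for other_name in full_name[1]:
--                     return_dict[main_name] += sublist.count(other_name)
--
--     return_dict = {key: value for key, value in return_dict.items() if value != 0}
--     return_dict = {k: return_dict[k] for k in sorted(return_dict)}
--     return return_dict
-- ===== SOURCE B (Python) =====
-- def count_names_in_sentence(sentence_list: list[list[str]], name_list: list[str]) -> dict[str, int]:
--     # Build one global word-count table in a single flattening pass, then a
--     # single pass over name_list sums table lookups (no per-sentence rescans).
--     counter = {}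
--     for sublist in sentence_list:
--         for word in sublist:
--             counter[word] = counter.get(word, 0) + 1
--
--     return_dict = {}
--     for full_name in name_list:
--         if not full_name or not full_name[0]:
--             continue
--         return_dict[" ".join(full_name[0])] = 0
--
--     if sentence_list:
--         for full_name in name_list:
--             if not full_name or not full_name[0]:
--                 continue
--             total = 0
--             for name in full_name[0]:
--                 total += counter.get(name, 0)
--             if full_name[1]:
--                 for other_name in full_name[1]:
--                     total += counter.get(other_name, 0)
--             main_name = " ".join(full_name[0])
--             return_dict[main_name] += total
--
--     return {k: return_dict[k] for k in sorted(return_dict) if return_dict[k] != 0}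
-- ===== Notes on version B (the rewrite author's own statement) =====
-- stated objective: faster
-- what changed: A rescans every sentence with sublist.count for every name part of every full name (nested passes); B builds one global word-count dictionary in a single flattening pass over the sentences and then makes a single pass over name_list summing O(1) dictionary lookups.
-- outside the precondition, e.g. on count_names_in_sentence([['c']], [[[''], []], [[], ['c']]]): A returns {'': 1}, B returns {}
import Mathlib
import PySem

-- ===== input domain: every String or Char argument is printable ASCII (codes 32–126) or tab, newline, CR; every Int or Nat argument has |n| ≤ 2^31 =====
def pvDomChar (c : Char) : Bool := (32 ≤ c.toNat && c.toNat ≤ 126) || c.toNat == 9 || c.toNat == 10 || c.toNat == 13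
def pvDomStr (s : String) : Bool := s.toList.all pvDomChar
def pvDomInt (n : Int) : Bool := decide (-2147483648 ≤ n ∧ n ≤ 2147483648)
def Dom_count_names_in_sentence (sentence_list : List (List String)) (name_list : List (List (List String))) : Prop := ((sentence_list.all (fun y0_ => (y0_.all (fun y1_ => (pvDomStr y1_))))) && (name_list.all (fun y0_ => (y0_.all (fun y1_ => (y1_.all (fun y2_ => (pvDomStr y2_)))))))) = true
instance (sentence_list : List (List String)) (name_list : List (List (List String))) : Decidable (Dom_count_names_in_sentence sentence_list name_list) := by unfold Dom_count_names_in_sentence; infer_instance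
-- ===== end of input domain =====

-- B replaces A's per-sentence rescan (sublist.count for every name part in every sentence) by ONE global
-- word-count dictionary built in a single flattening pass, then a single pass over name_list of O(1) lookups.

-- ===== PORT A =====
def count_names_in_sentence (sentence_list : List (List String)) (name_list : List (List (List String))) : List (String × Int) :=
  -- return_dict = {}; first loop: initialize valid main names to 0
  let d0 : PySem.Dict String Int := name_list.foldl (fun d fn =>
      if fn = [] ∨ fn.headD [] = [] then d
      else d.insert (PySem.Str.join " " (fn.headD [])) 0) PySem.Dict.empty
  -- second loop: for sublist in sentence_list: for full_name in name_list: …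
  let d1 : PySem.Dict String Int := sentence_list.foldl (fun d sublist =>
      name_list.foldl (fun d fn =>
        let main := PySem.Str.join " " (fn.headD [])
        let d := (fn.headD []).foldl (fun d name =>
            d.insert main (d.getD main 0 + (PySem.List.count sublist name : Int))) d
        if (PySem.List.pyGet? fn 1).getD [] ≠ [] then
          ((PySem.List.pyGet? fn 1).getD []).foldl (fun d o =>
            d.insert main (d.getD main 0 + (PySem.List.count sublist o : Int))) d
        else d) d) d0
  -- {key: value for key, value in return_dict.items() if value != 0}
  let d2 : PySem.Dict String Int := PySem.Dict.mk (d1.items.filter (fun kv => kv.2 ≠ 0))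
  -- {k: return_dict[k] for k in sorted(return_dict)}
  (PySem.List.sorted d2.keys (fun k => k) false).map (fun k => (k, d2.getD k 0))

-- ===== PORT B =====
def count_names_in_sentence_alt (sentence_list : List (List String)) (name_list : List (List (List String))) : List (String × Int) :=
  -- counter = {}; global word counts in one flattening pass
  let counter : PySem.Dict String Int := sentence_list.foldl (fun c sublist =>
      sublist.foldl (fun c w => c.insert w (c.getD w 0 + 1)) c) PySem.Dict.empty
  -- return_dict = {}; initialize valid main names to 0
  let rd : PySem.Dict String Int := name_list.foldl (fun d fn =>
      if fn = [] ∨ fn.headD [] = [] then d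
      else d.insert (PySem.Str.join " " (fn.headD [])) 0) PySem.Dict.empty
  -- if sentence_list: single pass over name_list, adding counter lookups
  let rd : PySem.Dict String Int := if sentence_list ≠ [] then
      name_list.foldl (fun d fn =>
        if fn = [] ∨ fn.headD [] = [] then d
        else
          let total := (fn.headD []).foldl (fun t name => t + counter.getD name 0) 0
          let total := if (PySem.List.pyGet? fn 1).getD [] ≠ [] then
              ((PySem.List.pyGet? fn 1).getD []).foldl (fun t o => t + counter.getD o 0) total
            else total
          let main := PySem.Str.join " " (fn.headD [])
          d.insert main (d.getD main 0 + total)) rd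
    else rd
  -- {k: return_dict[k] for k in sorted(return_dict) if return_dict[k] != 0}
  (PySem.List.sorted rd.keys (fun k => k) false).filterMap (fun k =>
    if rd.getD k 0 ≠ 0 then some (k, rd.getD k 0) else none)

-- ===== PRECONDITION & SPEC =====
-- Pre_ excludes inputs where A raises (IndexError on a name shorter than 2 sublists, KeyError on an
-- empty primary with aliases, when sentence_list is nonempty), and the defensible corner where a name
-- with an empty primary but nonempty aliases accidentally credits its alias counts to the key ""
-- created by another name — an artefact of A's unconditional second loop.
def Pre_count_names_in_sentence (sentence_list : List (List String)) (name_list : List (List (List String))) : Prop :=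
  sentence_list = [] ∨ ∀ fn ∈ name_list, 2 ≤ fn.length ∧ (fn.headD [] = [] → (PySem.List.pyGet? fn 1).getD [] = [])
instance (sentence_list : List (List String)) (name_list : List (List (List String))) : Decidable (Pre_count_names_in_sentence sentence_list name_list) := by unfold Pre_count_names_in_sentence; infer_instance

def pvWitness_count_names_in_sentence : List (List String) × List (List (List String)) :=
  ([["Ada", "saw", "Ada"], ["Grace"]], [[["Ada", "Lovelace"], ["Ada"]], [["Grace"], []]])

def Spec_count_names_in_sentence (sentence_list : List (List String)) (name_list : List (List (List String))) (out : List (String × Int)) : Prop := out = count_names_in_sentence_alt sentence_list name_list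
instance (sentence_list : List (List String)) (name_list : List (List (List String))) (out : List (String × Int)) : Decidable (Spec_count_names_in_sentence sentence_list name_list out) := by unfold Spec_count_names_in_sentence; infer_instance

-- ===== CLAIM (what is proved, stated in full; the proofs are below) =====
def Claim_equal_count_names_in_sentence : Prop := ∀ (sentence_list : List (List String)) (name_list : List (List (List String))), Dom_count_names_in_sentence sentence_list name_list → Pre_count_names_in_sentence sentence_list name_list → Spec_count_names_in_sentence sentence_list name_list (count_names_in_sentence sentence_list name_list)

-- ===== LEMMAS AND PROOFS =====

-- Proof-side names for the pieces of the two ports (definitionally equal to them).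
def pvKey (fn : List (List String)) : String := PySem.Str.join " " (fn.headD [])
def pvOthers (fn : List (List String)) : List String := (PySem.List.pyGet? fn 1).getD []
def pvStepA (sublist : List String) (d : PySem.Dict String Int) (fn : List (List String)) : PySem.Dict String Int :=
  if (PySem.List.pyGet? fn 1).getD [] ≠ [] then
    ((PySem.List.pyGet? fn 1).getD []).foldl (fun d o =>
      d.insert (PySem.Str.join " " (fn.headD []))
        (d.getD (PySem.Str.join " " (fn.headD [])) 0 + (PySem.List.count sublist o : Int)))
      ((fn.headD []).foldl (fun d name =>
        d.insert (PySem.Str.join " " (fn.headD []))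
          (d.getD (PySem.Str.join " " (fn.headD [])) 0 + (PySem.List.count sublist name : Int))) d)
  else (fn.headD []).foldl (fun d name =>
      d.insert (PySem.Str.join " " (fn.headD []))
        (d.getD (PySem.Str.join " " (fn.headD [])) 0 + (PySem.List.count sublist name : Int))) d
def pvD0 (nl : List (List (List String))) : PySem.Dict String Int :=
  nl.foldl (fun d fn => if fn = [] ∨ fn.headD [] = [] then d
    else d.insert (PySem.Str.join " " (fn.headD [])) 0) PySem.Dict.empty
def pvD1 (sl : List (List String)) (nl : List (List (List String))) : PySem.Dict String Int :=
  sl.foldl (fun d sublist => nl.foldl (pvStepA sublist) d) (pvD0 nl)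
def pvCounter (sl : List (List String)) : PySem.Dict String Int :=
  sl.foldl (fun c sublist => sublist.foldl (fun c w => c.insert w (c.getD w 0 + 1)) c) PySem.Dict.empty
def pvStepB (counter : PySem.Dict String Int) (d : PySem.Dict String Int) (fn : List (List String)) : PySem.Dict String Int :=
  if fn = [] ∨ fn.headD [] = [] then d
  else d.insert (PySem.Str.join " " (fn.headD []))
    (d.getD (PySem.Str.join " " (fn.headD [])) 0 +
      (if (PySem.List.pyGet? fn 1).getD [] ≠ [] then
        ((PySem.List.pyGet? fn 1).getD []).foldl (fun t o => t + counter.getD o 0)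
          ((fn.headD []).foldl (fun t name => t + counter.getD name 0) 0)
      else (fn.headD []).foldl (fun t name => t + counter.getD name 0) 0))
def pvRdB (sl : List (List String)) (nl : List (List (List String))) : PySem.Dict String Int :=
  if sl ≠ [] then nl.foldl (pvStepB (pvCounter sl)) (pvD0 nl) else pvD0 nl

theorem pvA_eq (sl : List (List String)) (nl : List (List (List String))) :
    count_names_in_sentence sl nl =
      (PySem.List.sorted (PySem.Dict.mk ((pvD1 sl nl).items.filter (fun kv => kv.2 ≠ 0))).keys (fun k => k) false).map
        (fun k => (k, (PySem.Dict.mk ((pvD1 sl nl).items.filter (fun kv => kv.2 ≠ 0))).getD k 0)) := rfl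

theorem pvB_eq (sl : List (List String)) (nl : List (List (List String))) :
    count_names_in_sentence_alt sl nl =
      (PySem.List.sorted (pvRdB sl nl).keys (fun k => k) false).filterMap
        (fun k => if (pvRdB sl nl).getD k 0 ≠ 0 then some (k, (pvRdB sl nl).getD k 0) else none) := rfl

-- per-full-name contributions
def pvCA (sub : List String) (fn : List (List String)) : Int :=
  ((fn.headD []).map (fun n => (PySem.List.count sub n : Int))).sum
    + ((pvOthers fn).map (fun o => (PySem.List.count sub o : Int))).sum
def pvCB (counter : PySem.Dict String Int) (fn : List (List String)) : Int :=
  if fn = [] ∨ fn.headD [] = [] then 0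
  else ((fn.headD []).map (fun n => counter.getD n 0)).sum
    + ((pvOthers fn).map (fun o => counter.getD o 0)).sum

-- a fold of "d[K] += g x" adds the sum at K and touches nothing else
theorem pv_getD_foldl_addkey (L : List String) (g : String → Int) (d : PySem.Dict String Int) (K m : String) :
    (L.foldl (fun d x => d.insert K (d.getD K 0 + g x)) d).getD m 0
      = d.getD m 0 + (if m = K then (L.map g).sum else 0) := by
  induction L generalizing d with
  | nil => simp
  | cons x t ih =>
    simp only [List.foldl_cons, List.map_cons, List.sum_cons, ih]
    rw [PySem.Dict.getD_insert]
    split_ifs with h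
    · subst h; ring
    · ring

theorem pv_keys_foldl_addkey (L : List String) (g : String → Int) (d : PySem.Dict String Int) (K : String)
    (h : K ∈ d.keys) :
    (L.foldl (fun d x => d.insert K (d.getD K 0 + g x)) d).keys = d.keys := by
  induction L generalizing d with
  | nil => rfl
  | cons x t ih =>
    simp only [List.foldl_cons]
    rw [ih _ (by rw [PySem.Dict.mem_keys_insert]; exact Or.inl rfl)]
    exact PySem.Dict.keys_insert_of_contains _ _ ((PySem.Dict.contains_iff_mem_keys _ _).mpr h)

theorem pv_getD_stepA (sub : List String) (d : PySem.Dict String Int) (fn : List (List String)) (m : String) :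
    (pvStepA sub d fn).getD m 0 = d.getD m 0 + (if m = pvKey fn then pvCA sub fn else 0) := by
  unfold pvStepA pvCA pvKey pvOthers
  by_cases ho : (PySem.List.pyGet? fn 1).getD [] = []
  · rw [if_neg (show ¬((PySem.List.pyGet? fn 1).getD [] ≠ []) by simp [ho]),
        pv_getD_foldl_addkey, ho]
    simp only [List.map_nil, List.sum_nil, add_zero]
  · rw [if_pos (show (PySem.List.pyGet? fn 1).getD [] ≠ [] from ho),
        pv_getD_foldl_addkey, pv_getD_foldl_addkey]
    split_ifs with h <;> ring

theorem pv_keys_stepA (sub : List String) (d : PySem.Dict String Int) (fn : List (List String))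
    (h : pvKey fn ∈ d.keys ∨ (fn.headD [] = [] ∧ pvOthers fn = [])) :
    (pvStepA sub d fn).keys = d.keys := by
  rcases h with h | ⟨h0, ho⟩
  · unfold pvKey at h
    unfold pvStepA
    have h1 := pv_keys_foldl_addkey (fn.headD []) (fun n => (PySem.List.count sub n : Int)) d
        (PySem.Str.join " " (fn.headD [])) h
    by_cases hne : (PySem.List.pyGet? fn 1).getD [] = []
    · rw [if_neg (show ¬((PySem.List.pyGet? fn 1).getD [] ≠ []) by simp [hne])]
      exact h1
    · rw [if_pos (show (PySem.List.pyGet? fn 1).getD [] ≠ [] from hne)]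
      rw [pv_keys_foldl_addkey ((PySem.List.pyGet? fn 1).getD []) (fun o => (PySem.List.count sub o : Int)) _
          (PySem.Str.join " " (fn.headD [])) (by rw [h1]; exact h), h1]
  · unfold pvOthers at ho
    unfold pvStepA
    rw [h0, ho, if_neg (show ¬(([] : List String) ≠ []) by simp)]
    rfl

theorem pv_getD_stepB (counter : PySem.Dict String Int) (d : PySem.Dict String Int) (fn : List (List String)) (m : String) :
    (pvStepB counter d fn).getD m 0 = d.getD m 0 + (if m = pvKey fn then pvCB counter fn else 0) := by
  unfold pvStepB pvCB pvKey pvOthers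
  by_cases hs : fn = [] ∨ fn.headD [] = []
  · rw [if_pos hs, if_pos hs]
    simp
  · rw [if_neg hs, if_neg hs]
    by_cases ho : (PySem.List.pyGet? fn 1).getD [] = []
    · rw [if_neg (show ¬((PySem.List.pyGet? fn 1).getD [] ≠ []) by simp [ho]),
          PySem.List.foldl_add, PySem.Dict.getD_insert, ho]
      simp only [List.map_nil, List.sum_nil, add_zero, zero_add]
      split_ifs with h
      · subst h; ring
      · ring
    · rw [if_pos (show (PySem.List.pyGet? fn 1).getD [] ≠ [] from ho),
          PySem.List.foldl_add, PySem.List.foldl_add, PySem.Dict.getD_insert]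
      simp only [zero_add]
      split_ifs with h
      · subst h; ring
      · ring

theorem pv_keys_stepB (counter : PySem.Dict String Int) (d : PySem.Dict String Int) (fn : List (List String))
    (h : ¬(fn = [] ∨ fn.headD [] = []) → pvKey fn ∈ d.keys) :
    (pvStepB counter d fn).keys = d.keys := by
  unfold pvStepB
  by_cases hs : fn = [] ∨ fn.headD [] = []
  · rw [if_pos hs]
  · rw [if_neg hs]
    exact PySem.Dict.keys_insert_of_contains _ _ ((PySem.Dict.contains_iff_mem_keys _ _).mpr (h hs))


-- folds over name_list, A side
theorem pv_foldA (sub : List String) (nl : List (List (List String))) (d : PySem.Dict String Int)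
    (h : ∀ fn ∈ nl, pvKey fn ∈ d.keys ∨ (fn.headD [] = [] ∧ pvOthers fn = [])) :
    (nl.foldl (pvStepA sub) d).keys = d.keys ∧
    ∀ m, (nl.foldl (pvStepA sub) d).getD m 0
        = d.getD m 0 + (nl.map (fun fn => if m = pvKey fn then pvCA sub fn else 0)).sum := by
  induction nl generalizing d with
  | nil => simp
  | cons fn t ih =>
    have hk := pv_keys_stepA sub d fn (h fn (by simp))
    obtain ⟨ik, ig⟩ := ih (pvStepA sub d fn) (by
      intro g hg
      rw [hk]
      exact h g (by simp [hg]))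
    refine ⟨by rw [List.foldl_cons, ik, hk], ?_⟩
    intro m
    simp only [List.foldl_cons, List.map_cons, List.sum_cons]
    rw [ig, pv_getD_stepA]
    ring

theorem pv_foldA_sl (sl : List (List String)) (nl : List (List (List String))) (d : PySem.Dict String Int)
    (h : ∀ fn ∈ nl, pvKey fn ∈ d.keys ∨ (fn.headD [] = [] ∧ pvOthers fn = [])) :
    (sl.foldl (fun d sublist => nl.foldl (pvStepA sublist) d) d).keys = d.keys ∧
    ∀ m, (sl.foldl (fun d sublist => nl.foldl (pvStepA sublist) d) d).getD m 0
        = d.getD m 0 + (sl.map (fun sub => (nl.map (fun fn => if m = pvKey fn then pvCA sub fn else 0)).sum)).sum := by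
  induction sl generalizing d with
  | nil => simp
  | cons sub t ih =>
    obtain ⟨ak, ag⟩ := pv_foldA sub nl d h
    obtain ⟨ik, ig⟩ := ih (nl.foldl (pvStepA sub) d) (by intro g hg; rw [ak]; exact h g hg)
    refine ⟨by rw [List.foldl_cons, ik, ak], ?_⟩
    intro m
    simp only [List.foldl_cons, List.map_cons, List.sum_cons]
    rw [ig, ag]
    ring

-- fold over name_list, B side
theorem pv_foldB (counter : PySem.Dict String Int) (nl : List (List (List String))) (d : PySem.Dict String Int)
    (h : ∀ fn ∈ nl, ¬(fn = [] ∨ fn.headD [] = []) → pvKey fn ∈ d.keys) :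
    (nl.foldl (pvStepB counter) d).keys = d.keys ∧
    ∀ m, (nl.foldl (pvStepB counter) d).getD m 0
        = d.getD m 0 + (nl.map (fun fn => if m = pvKey fn then pvCB counter fn else 0)).sum := by
  induction nl generalizing d with
  | nil => simp
  | cons fn t ih =>
    have hk := pv_keys_stepB counter d fn (h fn (by simp))
    obtain ⟨ik, ig⟩ := ih (pvStepB counter d fn) (by
      intro g hg hgs
      rw [hk]
      exact h g (by simp [hg]) hgs)
    refine ⟨by rw [List.foldl_cons, ik, hk], ?_⟩
    intro m
    simp only [List.foldl_cons, List.map_cons, List.sum_cons]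
    rw [ig, pv_getD_stepB]
    ring

-- global counter = per-sentence counts summed
theorem pv_counter_getD_aux (sl : List (List String)) (d : PySem.Dict String Int) (w : String) :
    (sl.foldl (fun c sublist => sublist.foldl (fun c w => c.insert w (c.getD w 0 + 1)) c) d).getD w 0
      = d.getD w 0 + (sl.map (fun sub => (PySem.List.count sub w : Int))).sum := by
  induction sl generalizing d with
  | nil => simp
  | cons sub t ih =>
    simp only [List.foldl_cons, List.map_cons, List.sum_cons]
    rw [ih, PySem.Dict.getD_foldl_insert_add_one]
    simp only [PySem.List.count_eq]
    ring

theorem pv_counter_getD (sl : List (List String)) (w : String) :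
    (pvCounter sl).getD w 0 = (sl.map (fun sub => (PySem.List.count sub w : Int))).sum := by
  unfold pvCounter
  rw [pv_counter_getD_aux]
  simp

-- swapping a double list sum
theorem pv_sum_swap {α β : Type} (xs : List α) (ys : List β) (f : α → β → Int) :
    (xs.map (fun x => (ys.map (fun y => f x y)).sum)).sum
      = (ys.map (fun y => (xs.map (fun x => f x y)).sum)).sum := by
  induction xs with
  | nil => simp
  | cons x t ih =>
    simp only [List.map_cons, List.sum_cons, ih]
    rw [← PySem.List.sum_map_add_int]

theorem pv_sum_ite {α : Type} (l : List α) (c : α → Int) (P : Prop) [Decidable P] :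
    (l.map (fun s => if P then c s else 0)).sum = (if P then (l.map c).sum else 0) := by
  by_cases h : P <;> simp [h]

-- summed per-sentence contribution of a full name = its one-shot counter contribution
theorem pv_sum_cA_eq_cB (sl : List (List String)) (fn : List (List String))
    (h : fn.headD [] = [] → pvOthers fn = []) :
    (sl.map (fun sub => pvCA sub fn)).sum = pvCB (pvCounter sl) fn := by
  by_cases hs : fn = [] ∨ fn.headD [] = []
  · have h0 : fn.headD [] = [] := by
      rcases hs with hs | hs
      · simp [hs]
      · exact hs
    have ho := h h0
    unfold pvOthers at ho
    unfold pvCA pvCB pvOthers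
    rw [if_pos hs, h0, ho]
    simp
  · unfold pvCA pvCB pvOthers
    rw [if_neg hs]
    rw [PySem.List.sum_map_add_int sl
        (fun sub => ((fn.headD []).map (fun n => (PySem.List.count sub n : Int))).sum)
        (fun sub => (((PySem.List.pyGet? fn 1).getD []).map (fun o => (PySem.List.count sub o : Int))).sum)]
    rw [pv_sum_swap sl (fn.headD []) (fun sub n => (PySem.List.count sub n : Int)),
        pv_sum_swap sl ((PySem.List.pyGet? fn 1).getD []) (fun sub o => (PySem.List.count sub o : Int))]
    congr 1
    · exact congrArg List.sum (List.map_congr_left (fun n _ => (pv_counter_getD sl n).symm))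
    · exact congrArg List.sum (List.map_congr_left (fun n _ => (pv_counter_getD sl n).symm))

-- values keys of pvD0
theorem pv_mem_keys_foldl_d0 (nl : List (List (List String))) (d : PySem.Dict String Int) (k : String)
    (h : k ∈ d.keys) :
    k ∈ (nl.foldl (fun d fn => if fn = [] ∨ fn.headD [] = [] then d
        else d.insert (PySem.Str.join " " (fn.headD [])) 0) d).keys := by
  induction nl generalizing d with
  | nil => exact h
  | cons fn t ih =>
    simp only [List.foldl_cons]
    apply ih
    by_cases hs : fn = [] ∨ fn.headD [] = []
    · rw [if_pos hs]; exact h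
    · rw [if_neg hs, PySem.Dict.mem_keys_insert]
      exact Or.inr h

theorem pv_mem_keys_d0_aux (nl : List (List (List String))) (d : PySem.Dict String Int)
    (fn : List (List String)) (hm : fn ∈ nl) (hs : ¬(fn = [] ∨ fn.headD [] = [])) :
    pvKey fn ∈ (nl.foldl (fun d fn => if fn = [] ∨ fn.headD [] = [] then d
        else d.insert (PySem.Str.join " " (fn.headD [])) 0) d).keys := by
  induction nl generalizing d with
  | nil => cases hm
  | cons g t ih =>
    simp only [List.foldl_cons]
    rcases List.mem_cons.mp hm with rfl | hm
    · apply pv_mem_keys_foldl_d0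
      rw [if_neg hs, PySem.Dict.mem_keys_insert]
      exact Or.inl rfl
    · exact ih _ hm

theorem pv_mem_keys_d0 (nl : List (List (List String))) (fn : List (List String))
    (hm : fn ∈ nl) (hs : ¬(fn = [] ∨ fn.headD [] = [])) : pvKey fn ∈ (pvD0 nl).keys :=
  pv_mem_keys_d0_aux nl PySem.Dict.empty fn hm hs

theorem pv_nodup_keys_d0 (nl : List (List (List String))) : (pvD0 nl).keys.Nodup := by
  unfold pvD0
  generalize hd : PySem.Dict.empty = d
  have hnd : d.keys.Nodup := by rw [← hd]; exact PySem.Dict.nodup_keys_empty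
  clear hd
  induction nl generalizing d with
  | nil => exact hnd
  | cons fn t ih =>
    simp only [List.foldl_cons]
    apply ih
    by_cases hs : fn = [] ∨ fn.headD [] = []
    · rw [if_pos hs]; exact hnd
    · rw [if_neg hs]
      exact PySem.Dict.nodup_keys_insert _ _ _ hnd

-- filterMap of an if-some = filter then map
theorem pv_filterMap_if {α β : Type} (l : List α) (p : α → Prop) [DecidablePred p] (f : α → β) :
    l.filterMap (fun x => if p x then some (f x) else none)
      = (l.filter (fun x => decide (p x))).map f := by
  induction l with
  | nil => rfl
  | cons x t ih => by_cases h : p x <;> simp [h, ih]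

-- the shared final stage: filter-then-sort (A) = sort-then-filter (B)
theorem pv_final (D E : PySem.Dict String Int) (hk : D.keys = E.keys) (hnd : D.keys.Nodup)
    (hg : ∀ m, D.getD m 0 = E.getD m 0) :
    (PySem.List.sorted (PySem.Dict.mk (D.items.filter (fun kv => kv.2 ≠ 0))).keys (fun k => k) false).map
        (fun k => (k, (PySem.Dict.mk (D.items.filter (fun kv => kv.2 ≠ 0))).getD k 0))
    = (PySem.List.sorted E.keys (fun k => k) false).filterMap
        (fun k => if E.getD k 0 ≠ 0 then some (k, E.getD k 0) else none) := by
  have hitems : D.items = D.keys.map (fun k => (k, D.getD k 0)) := PySem.Dict.items_eq_map_keys D hnd 0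
  have hfilter : D.items.filter (fun kv => decide (kv.2 ≠ 0))
      = (D.keys.filter (fun k => decide (D.getD k 0 ≠ 0))).map (fun k => (k, D.getD k 0)) := by
    rw [hitems, List.filter_map]
    rfl
  have hkeys2 : (PySem.Dict.mk (D.items.filter (fun kv => kv.2 ≠ 0))).keys
      = D.keys.filter (fun k => decide (D.getD k 0 ≠ 0)) := by
    show (D.items.filter (fun kv => decide (kv.2 ≠ 0))).map (fun p => p.1)
        = D.keys.filter (fun k => decide (D.getD k 0 ≠ 0))
    rw [hfilter, List.map_map]
    exact List.map_id _
  have hnd2 : (PySem.Dict.mk (D.items.filter (fun kv => kv.2 ≠ 0))).keys.Nodup := by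
    rw [hkeys2]; exact hnd.filter _
  have hget2 : ∀ k ∈ D.keys.filter (fun k => decide (D.getD k 0 ≠ 0)),
      (PySem.Dict.mk (D.items.filter (fun kv => kv.2 ≠ 0))).getD k 0 = D.getD k 0 := by
    intro k hkmem
    refine PySem.Dict.getD_of_mem_items _ ?_ hnd2 0
    show (k, D.getD k 0) ∈ D.items.filter (fun kv => decide (kv.2 ≠ 0))
    rw [hfilter]
    exact List.mem_map_of_mem hkmem
  have hperm : ((PySem.List.sorted D.keys (fun k => k) false).filter (fun k => decide (D.getD k 0 ≠ 0))).Perm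
      (D.keys.filter (fun k => decide (D.getD k 0 ≠ 0))) :=
    (PySem.List.sorted_perm D.keys (fun k => k) false).filter _
  have hsorted : PySem.List.sorted (D.keys.filter (fun k => decide (D.getD k 0 ≠ 0))) (fun k => k) false
      = (PySem.List.sorted D.keys (fun k => k) false).filter (fun k => decide (D.getD k 0 ≠ 0)) := by
    apply PySem.List.sorted_eq_of_perm_of_pairwise_lt
    · exact hperm
    · have hle : (PySem.List.sorted D.keys (fun k => k) false).Pairwise (fun a b => a ≤ b) :=
        PySem.List.sorted_pairwise D.keys (fun k => k)
      have hnods : (PySem.List.sorted D.keys (fun k => k) false).Nodup :=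
        ((PySem.List.sorted_perm D.keys (fun k => k) false).nodup_iff).mpr hnd
      have hlt : (PySem.List.sorted D.keys (fun k => k) false).Pairwise (fun a b => a < b) :=
        (hle.and hnods).imp (fun hab => lt_of_le_of_ne hab.1 hab.2)
      exact hlt.filter _
  rw [pv_filterMap_if (PySem.List.sorted E.keys (fun k => k) false)
        (fun k => E.getD k 0 ≠ 0) (fun k => (k, E.getD k 0))]
  rw [hkeys2, hsorted, ← hk]
  have hpred : (fun k => decide (E.getD k 0 ≠ 0)) = (fun k => decide (D.getD k 0 ≠ 0)) := by
    funext k; rw [hg k]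
  rw [hpred]
  apply List.map_congr_left
  intro k hkm
  have hkin : k ∈ D.keys.filter (fun k => decide (D.getD k 0 ≠ 0)) := hperm.mem_iff.mp hkm
  rw [hget2 k hkin, hg k]

-- ===== VERDICT (by name: the statement is the Claim_ definition above) =====
theorem count_names_in_sentence_spec : Claim_equal_count_names_in_sentence := by
  intro sl nl _dom pre
  unfold Spec_count_names_in_sentence
  rw [pvA_eq, pvB_eq]
  by_cases hsl : sl = []
  · subst hsl
    have hRd : pvRdB [] nl = pvD0 nl := by simp [pvRdB]
    rw [show pvD1 [] nl = pvD0 nl from rfl, hRd]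
    exact pv_final (pvD0 nl) (pvD0 nl) rfl (pv_nodup_keys_d0 nl) (fun m => rfl)
  · rcases pre with pre | pre
    · exact absurd pre hsl
    have hA := pv_foldA_sl sl nl (pvD0 nl) (fun fn hm => by
      by_cases hs : fn = [] ∨ fn.headD [] = []
      · right
        have h2 := (pre fn hm).2
        have h1 := (pre fn hm).1
        rcases hs with hs | hs
        · subst hs; simp at h1
        · exact ⟨hs, h2 hs⟩
      · exact Or.inl (pv_mem_keys_d0 nl fn hm hs))
    have hB := pv_foldB (pvCounter sl) nl (pvD0 nl) (fun fn hm hs => pv_mem_keys_d0 nl fn hm hs)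
    have hRd : pvRdB sl nl = nl.foldl (pvStepB (pvCounter sl)) (pvD0 nl) := by simp [pvRdB, hsl]
    have hk1 : (pvD1 sl nl).keys = (pvD0 nl).keys := hA.1
    apply pv_final
    · rw [hk1, hRd]; exact hB.1.symm
    · rw [hk1]; exact pv_nodup_keys_d0 nl
    · intro m
      rw [hRd]
      have g1 : (pvD1 sl nl).getD m 0 = (pvD0 nl).getD m 0
          + (sl.map (fun sub => (nl.map (fun fn => if m = pvKey fn then pvCA sub fn else 0)).sum)).sum := hA.2 m
      rw [g1, hB.2 m]
      congr 1
      rw [pv_sum_swap sl nl (fun sub fn => if m = pvKey fn then pvCA sub fn else 0)]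
      apply congrArg List.sum
      apply List.map_congr_left
      intro fn hm
      rw [pv_sum_ite sl (fun sub => pvCA sub fn) (m = pvKey fn)]
      by_cases h : m = pvKey fn
      · simp only [h, if_pos]
        exact pv_sum_cA_eq_cB sl fn (pre fn hm).2
      · simp [h]
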